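-- pv_equiv track=rewrite | github.com/thetenthbox/noisyir | .ipynb_checkpoints/assess-checkpoint.py | manipulate_strings
-- ===== SOURCE A (Python) =====
-- def manipulate_strings(original_strings, number_list):
--     manipulated_strings = []
--     manipulate = original_strings
--     for numbers in number_list:
--         # Use list comprehension to rearrange the strings based on the current number list
--         new_strings = [manipulate[i - 1] for i in numbers]
--         manipulated_strings.append(new_strings)
--         manipulate = new_strings
--     return manipulated_strings
-- ===== SOURCE B (Python) =====
-- def manipulate_strings(original_strings, number_list):
--     # Recursive decomposition: the first output row is the first rearrangement,
--     # the rest is the same problem on that row and the remaining number lists.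
--     if not number_list:
--         return []
--     head = [original_strings[i - 1] for i in number_list[0]]
--     return [head] + manipulate_strings(head, number_list[1:])
-- ===== Notes on version B (the rewrite author's own statement) =====
-- stated objective: simpler
-- what changed: B replaces A's iterative loop with an accumulator list and a threaded 'manipulate' state variable by a direct structural recursion on number_list that builds the result by prepending the head row, with no mutable state.
import Mathlib
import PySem

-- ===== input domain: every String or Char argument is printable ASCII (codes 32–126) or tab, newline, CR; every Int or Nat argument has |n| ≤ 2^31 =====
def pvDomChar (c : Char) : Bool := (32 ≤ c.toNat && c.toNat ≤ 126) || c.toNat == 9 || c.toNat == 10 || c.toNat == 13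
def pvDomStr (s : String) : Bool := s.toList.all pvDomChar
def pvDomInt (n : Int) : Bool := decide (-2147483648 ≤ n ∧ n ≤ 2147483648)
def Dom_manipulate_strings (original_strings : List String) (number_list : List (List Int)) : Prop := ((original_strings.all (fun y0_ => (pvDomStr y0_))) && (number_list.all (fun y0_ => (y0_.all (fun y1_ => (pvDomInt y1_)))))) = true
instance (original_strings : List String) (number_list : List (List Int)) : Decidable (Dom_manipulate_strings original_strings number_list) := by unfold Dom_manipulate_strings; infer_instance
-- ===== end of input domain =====

-- ===== PORT A =====
-- B replaces A's accumulator loop with threaded state by direct structural recursion building the result by cons (simpler decomposition; same cost).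
-- A's loop threads the pair (manipulated_strings, manipulate); it is a foldl over number_list on that pair.
def manipulate_strings (original_strings : List String) (number_list : List (List Int)) : List (List String) :=
  (number_list.foldl
    (fun (st : List (List String) × List String) numbers =>
      let new_strings := numbers.map (fun i => PySem.List.pyGetD st.2 (i - 1) "")
      (st.1 ++ [new_strings], new_strings))
    ([], original_strings)).1

-- ===== PORT B =====
def manipulate_strings_alt (original_strings : List String) (number_list : List (List Int)) : List (List String) :=
  match number_list with
  | [] => []
  | numbers :: rest =>
      let head := numbers.map (fun i => PySem.List.pyGetD original_strings (i - 1) "")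
      head :: manipulate_strings_alt head rest

-- ===== PRECONDITION & SPEC =====
-- Pre_ excludes exactly the inputs where the Python raises IndexError: at each step every index
-- i-1 must be in Python range for the previous row (whose length is the previous numbers' length).
def pvPreB (L : Nat) (nl : List (List Int)) : Bool :=
  match nl with
  | [] => true
  | ns :: rest => ns.all (fun i => decide (-(L : Int) ≤ i - 1 ∧ i - 1 < (L : Int))) && pvPreB ns.length rest

def Pre_manipulate_strings (original_strings : List String) (number_list : List (List Int)) : Prop :=
  pvPreB original_strings.length number_list = true
instance (original_strings : List String) (number_list : List (List Int)) : Decidable (Pre_manipulate_strings original_strings number_list) := by unfold Pre_manipulate_strings; infer_instance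

def pvWitness_manipulate_strings : List String × List (List Int) := (["a", "b"], [[2, 1], [0, 1]])

def Spec_manipulate_strings (original_strings : List String) (number_list : List (List Int)) (out : List (List String)) : Prop := out = manipulate_strings_alt original_strings number_list
instance (original_strings : List String) (number_list : List (List Int)) (out : List (List String)) : Decidable (Spec_manipulate_strings original_strings number_list out) := by unfold Spec_manipulate_strings; infer_instance

-- ===== CLAIM (what is proved, stated in full; the proofs are below) =====
def Claim_equal_manipulate_strings : Prop := ∀ (original_strings : List String) (number_list : List (List Int)), Dom_manipulate_strings original_strings number_list → Pre_manipulate_strings original_strings number_list → Spec_manipulate_strings original_strings number_list (manipulate_strings original_strings number_list)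

-- ===== LEMMAS AND PROOFS =====

-- A's accumulator fold, started from any accumulator, appends exactly B's recursive result.
theorem pv_foldl_eq_rec (nl : List (List Int)) :
    ∀ (acc : List (List String)) (manip : List String),
      (nl.foldl
        (fun (st : List (List String) × List String) numbers =>
          let new_strings := numbers.map (fun i => PySem.List.pyGetD st.2 (i - 1) "")
          (st.1 ++ [new_strings], new_strings))
        (acc, manip)).1 = acc ++ manipulate_strings_alt manip nl := by
  induction nl with
  | nil => intro acc manip; simp [manipulate_strings_alt]
  | cons numbers rest ih =>
    intro acc manip
    simp only [List.foldl_cons]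
    rw [ih]
    simp [manipulate_strings_alt]

-- ===== VERDICT (by name: the statement is the Claim_ definition above) =====
theorem manipulate_strings_spec : Claim_equal_manipulate_strings := by
  intro orig nl _ _
  unfold Spec_manipulate_strings manipulate_strings
  rw [pv_foldl_eq_rec]
  simp
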